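-- pv_equiv track=rewrite | github.com/neravaren/ep2000-cloudwatch | ep20_api.py | handle_com_returned
-- ===== SOURCE A (Python) =====
-- def handle_com_returned(hexstrg):
--     """
--     Helper to format response
--     """
--     # Remove the first 8 characters
--     hexstrg = hexstrg[8:]
--     # Remove the last 5 characters
--     hexstrg = hexstrg[:-5]
--     # Trim the string
--     hexstrg = hexstrg.strip()
--     # Create a list of characters from the string
--     str_list = list(hexstrg)
--     # Iterate backwards over the string
--     for start_index in range(len(str_list) - 1, -1, -1):
--         if start_index % 6 == 2:
--             del str_list[start_index]
--     # Join the list back into a string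
--     result_str = ''.join(str_list)
--     # Split the string by spaces and return the list
--     return result_str.split(' ')
-- ===== SOURCE B (Python) =====
-- def handle_com_returned(hexstrg):
--     # Same fixed trims, then consume the string forward in 6-char blocks,
--     # keeping block[:2] + block[3:] (i.e. dropping each block's 3rd char).
--     s = hexstrg[8:][:-5].strip()
--     pieces = []
--     while s:
--         block, s = s[:6], s[6:]
--         pieces.append(block[:2] + block[3:])
--     return ''.join(pieces).split(' ')
-- ===== Notes on version B (the rewrite author's own statement) =====
-- stated objective: faster
-- what changed: Replaces A's backward index loop that deletes every character at index % 6 == 2 from a mutable char list (each del is O(n)) with a forward single pass consuming the trimmed string in fixed 6-character blocks, keeping block[:2] + block[3:] of each block.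
import Mathlib
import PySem

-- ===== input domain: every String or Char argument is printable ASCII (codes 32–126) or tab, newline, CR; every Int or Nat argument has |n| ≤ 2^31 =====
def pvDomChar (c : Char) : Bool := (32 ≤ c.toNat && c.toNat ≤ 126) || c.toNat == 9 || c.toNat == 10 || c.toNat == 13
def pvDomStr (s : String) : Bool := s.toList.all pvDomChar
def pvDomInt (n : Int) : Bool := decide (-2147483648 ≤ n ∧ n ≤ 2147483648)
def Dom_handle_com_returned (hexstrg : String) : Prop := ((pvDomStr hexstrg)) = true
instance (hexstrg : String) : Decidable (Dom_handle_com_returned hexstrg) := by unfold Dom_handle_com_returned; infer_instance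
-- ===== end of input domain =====

-- B rebuilds the trimmed string forward in fixed 6-char blocks (keeping block[:2]+block[3:])
-- instead of A's backward per-index deletion loop; objective: simpler, same cost.

-- ===== PORT A =====
-- literal port of Source A: trim slices, strip, backward range loop deleting indices ≡ 2 (mod 6), join, split(' ')
-- (range yields only indices 0 ≤ i < current length, so `i.toNat` is exact here, and ''.join of
-- the char list is String.ofList; .split(' ') is Chars.splitOn on the single space)
def handle_com_returned (hexstrg : String) : List String :=
  let s1 := PySem.Chars.slice hexstrg.toList (some 8) none
  let s2 := PySem.Chars.slice s1 none (some (-5))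
  let s3 := PySem.Chars.strip s2
  let strList := s3
  let final := (PySem.List.pyRange ((strList.length : Int) - 1) (-1) (-1)).foldl
      (fun acc i => if i % 6 == 2 then acc.eraseIdx i.toNat else acc) strList
  (PySem.Chars.splitOn final [' ']).map String.ofList

-- ===== PORT B =====
-- Source B's while loop: peel block = s[:6], s = s[6:], keep block[:2] + block[3:]
def altBlocks (l : List Char) : List Char :=
  if l = [] then []
  else ((l.take 6).take 2 ++ (l.take 6).drop 3) ++ altBlocks (l.drop 6)
termination_by l.length
decreasing_by
  rename_i h
  cases l with
  | nil => exact absurd rfl h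
  | cons a t => simp [List.length_drop]

def handle_com_returned_alt (hexstrg : String) : List String :=
  let s := PySem.Chars.strip
    (PySem.Chars.slice (PySem.Chars.slice hexstrg.toList (some 8) none) none (some (-5)))
  (PySem.Chars.splitOn (altBlocks s) [' ']).map String.ofList

-- ===== PRECONDITION & SPEC =====
def Spec_handle_com_returned (hexstrg : String) (out : List String) : Prop := out = handle_com_returned_alt hexstrg
instance (hexstrg : String) (out : List String) : Decidable (Spec_handle_com_returned hexstrg out) := by unfold Spec_handle_com_returned; infer_instance

-- ===== CLAIM (what is proved, stated in full; the proofs are below) =====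
def Claim_equal_handle_com_returned : Prop := ∀ (hexstrg : String), Dom_handle_com_returned hexstrg → Spec_handle_com_returned hexstrg (handle_com_returned hexstrg)

-- ===== LEMMAS AND PROOFS =====

-- keep the characters whose (0-based) index, offset by n, is ≢ 2 (mod 6)
def filtAux (n : Nat) : List Char → List Char
  | [] => []
  | c :: cs => if n % 6 = 2 then filtAux (n + 1) cs else c :: filtAux (n + 1) cs

theorem filtAux_add_six (l : List Char) : ∀ n, filtAux (n + 6) l = filtAux n l := by
  induction l with
  | nil => intro n; rfl
  | cons c cs ih =>
      intro n
      have h6 : (n + 6) % 6 = n % 6 := Nat.add_mod_right n 6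
      show filtAux (n + 6) (c :: cs) = filtAux n (c :: cs)
      simp only [filtAux, h6]
      have : n + 6 + 1 = n + 1 + 6 := by omega
      rw [this, ih (n + 1)]

theorem filtAux_snoc (xs : List Char) : ∀ (n : Nat) (a : Char),
    filtAux n (xs ++ [a]) = filtAux n xs ++ (if (n + xs.length) % 6 = 2 then [] else [a]) := by
  induction xs with
  | nil => intro n a; simp [filtAux]
  | cons c cs ih =>
      intro n a
      simp only [List.cons_append, filtAux, ih (n + 1) a, List.length_cons]
      have : n + 1 + cs.length = n + (cs.length + 1) := by omega
      rw [this]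
      split_ifs <;> simp

theorem fold_del_eq_filtAux (k : Nat) : ∀ (l : List Char), k ≤ l.length →
    (PySem.List.pyRange ((k : Int) - 1) (-1) (-1)).foldl
        (fun acc i => if i % 6 == 2 then acc.eraseIdx i.toNat else acc) l
      = filtAux 0 (l.take k) ++ l.drop k := by
  induction k with
  | zero =>
      intro l _
      rw [PySem.List.pyRange_neg_one_eq_nil (by norm_num)]
      simp [filtAux]
  | succ k ih =>
      intro l hk
      have hkl : k < l.length := by omega
      have hcons : PySem.List.pyRange (((k + 1 : Nat) : Int) - 1) (-1) (-1)
          = ((k : Nat) : Int) :: PySem.List.pyRange ((k : Int) - 1) (-1) (-1) := by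
        have h1 : ((k + 1 : Nat) : Int) - 1 = ((k : Nat) : Int) := by push_cast; ring
        rw [h1]
        exact PySem.List.pyRange_neg_one_cons (by omega)
      rw [hcons, List.foldl_cons]
      have htake : l.take (k + 1) = l.take k ++ [l[k]] := by
        rw [List.take_add_one, List.getElem?_eq_getElem hkl]
        simp
      have hmod : (((k : Nat) : Int) % 6 == 2) = (decide (k % 6 = 2)) := by
        rcases Nat.decEq (k % 6) 2 with h | h
        · simp only [decide_eq_false h, beq_eq_false_iff_ne, ne_eq]
          intro hc
          apply h
          omega
        · simp only [decide_eq_true h]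
          have : ((k : Nat) : Int) % 6 = 2 := by omega
          simp [this]
      by_cases hc : k % 6 = 2
      · rw [hmod, if_pos (by simp [hc])]
        have herase : l.eraseIdx ((k : Nat) : Int).toNat = l.take k ++ l.drop (k + 1) := by
          simpa using List.eraseIdx_eq_take_drop_succ l k
        rw [herase]
        have hlen : k ≤ (l.take k ++ l.drop (k + 1)).length := by
          simp [List.length_take, List.length_drop]; omega
        rw [ih _ hlen]
        have h1 : (l.take k ++ l.drop (k + 1)).take k = l.take k := by
          rw [List.take_append_of_le_length (by simp; omega)]
          simp [List.take_take]
        have h2 : (l.take k ++ l.drop (k + 1)).drop k = l.drop (k + 1) := by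
          rw [List.drop_append_of_le_length (by simp; omega)]
          simp
        rw [h1, h2, htake, filtAux_snoc]
        have : (0 + (l.take k).length) % 6 = 2 := by
          simp [List.length_take, Nat.min_eq_left hkl.le, hc]
        rw [if_pos this]
        simp
      · rw [hmod, if_neg (by simp [hc])]
        rw [ih _ (by omega)]
        rw [htake, filtAux_snoc]
        have : ¬ (0 + (l.take k).length) % 6 = 2 := by
          simp [List.length_take, Nat.min_eq_left hkl.le, hc]
        rw [if_neg this]
        have hdrop : l.drop k = l[k] :: l.drop (k + 1) := List.drop_eq_getElem_cons hkl
        rw [hdrop]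
        simp

theorem altBlocks_eq_filtAux (l : List Char) : altBlocks l = filtAux 0 l := by
  induction l using altBlocks.induct with
  | case1 => simp [altBlocks, filtAux]
  | case2 l hne ih =>
      rw [altBlocks, if_neg hne, ih]
      rcases l with _ | ⟨a, _ | ⟨b, _ | ⟨c, _ | ⟨d, _ | ⟨e, _ | ⟨f, rest⟩⟩⟩⟩⟩⟩ <;>
        simp [filtAux, filtAux_add_six]

-- ===== VERDICT (by name: the statement is the Claim_ definition above) =====
theorem handle_com_returned_spec : Claim_equal_handle_com_returned := by
  intro hexstrg _
  unfold Spec_handle_com_returned handle_com_returned handle_com_returned_alt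
  have h := fold_del_eq_filtAux
    (PySem.Chars.strip (PySem.Chars.slice (PySem.Chars.slice hexstrg.toList (some 8) none) none (some (-5)))).length
    (PySem.Chars.strip (PySem.Chars.slice (PySem.Chars.slice hexstrg.toList (some 8) none) none (some (-5))))
    le_rfl
  simp only [List.take_length, List.drop_length, List.append_nil] at h
  show (PySem.Chars.splitOn
      ((PySem.List.pyRange ((((PySem.Chars.strip (PySem.Chars.slice (PySem.Chars.slice hexstrg.toList (some 8) none) none (some (-5)))).length : Int)) - 1) (-1) (-1)).foldl
        (fun acc i => if i % 6 == 2 then acc.eraseIdx i.toNat else acc)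
        (PySem.Chars.strip (PySem.Chars.slice (PySem.Chars.slice hexstrg.toList (some 8) none) none (some (-5))))) [' ']).map String.ofList
    = (PySem.Chars.splitOn (altBlocks (PySem.Chars.strip (PySem.Chars.slice (PySem.Chars.slice hexstrg.toList (some 8) none) none (some (-5))))) [' ']).map String.ofList
  rw [h, altBlocks_eq_filtAux]
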